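-- pv_equiv track=rewrite | github.com/rachitkakkar/rachitkakkar.github.io | content/posts/the-power-of-compounding/CrackFreeWalls.py | gen_possible_connections
-- ===== SOURCE A (Python) =====
-- def gen_possible_connections(all_rows):
--   all_connections = []
--
--   for i, row1 in enumerate(all_rows):
--     connections = []
--     for j, row2 in enumerate(all_rows):
--       if (set(row1).isdisjoint(row2)):
--         connections.append(j)
--     all_connections.append(connections)
--   return all_connections
-- ===== SOURCE B (Python) =====
-- def gen_possible_connections(all_rows):
--   # Inverted index: crack position -> row indices containing it.
--   index = {}
--   for i, row in enumerate(all_rows):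
--     for p in set(row):
--       index[p] = index.get(p, []) + [i]
--   n = len(all_rows)
--   result = []
--   for row in all_rows:
--     conflict = set()
--     for p in set(row):
--       conflict.update(index.get(p, []))
--     result.append([j for j in range(n) if j not in conflict])
--   return result
-- ===== Notes on version B (the rewrite author's own statement) =====
-- stated objective: faster
-- what changed: Replaces the all-pairs isdisjoint scan with an inverted index from crack position to row indices: each row's conflict set is the union of the index lists of its positions, and the row's connections are the complement of that set over range(n).
import Mathlib
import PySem

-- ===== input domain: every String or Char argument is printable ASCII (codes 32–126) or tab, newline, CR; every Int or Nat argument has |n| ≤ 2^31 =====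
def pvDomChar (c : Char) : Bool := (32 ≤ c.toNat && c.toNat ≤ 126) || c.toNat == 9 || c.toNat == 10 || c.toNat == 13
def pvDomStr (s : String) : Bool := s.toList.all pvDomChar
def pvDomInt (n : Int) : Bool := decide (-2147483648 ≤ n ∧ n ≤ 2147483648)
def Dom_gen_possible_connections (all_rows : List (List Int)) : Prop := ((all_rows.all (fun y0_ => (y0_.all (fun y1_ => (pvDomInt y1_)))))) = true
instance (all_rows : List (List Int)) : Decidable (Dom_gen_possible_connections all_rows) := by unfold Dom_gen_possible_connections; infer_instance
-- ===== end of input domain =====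

-- B replaces the all-pairs isdisjoint scan with an inverted index (crack position -> row indices);
-- each row's connections are the complement of the union of its positions' index lists.

-- ===== PORT A =====
-- inner loop of A: 'for j, row2 in enumerate(all_rows): if set(row1).isdisjoint(row2): connections.append(j)'
def pvInnerA (all_rows : List (List Int)) (row1 : List Int) : List Int :=
  (PySem.List.enumerate all_rows).foldl
    (fun cs q => if PySem.Set.isdisjoint (PySem.Set.ofList row1) q.2 then cs ++ [q.1] else cs) []

def gen_possible_connections (all_rows : List (List Int)) : List (List Int) :=
  (PySem.List.enumerate all_rows).foldl
    (fun all_connections p => all_connections ++ [pvInnerA all_rows p.2]) []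

-- ===== PORT B =====
-- 'for i, row in enumerate(all_rows): for p in set(row): index[p] = index.get(p, []) + [i]'
def pvBuildIndex (all_rows : List (List Int)) : PySem.Dict Int (List Int) :=
  (PySem.List.enumerate all_rows).foldl
    (fun index p =>
      (PySem.Set.ofList p.2).foldl (fun d q => d.insert q (d.getD q [] ++ [p.1])) index)
    PySem.Dict.empty

-- 'conflict = set(); for p in set(row): conflict.update(index.get(p, []))'
def pvConflict (index : PySem.Dict Int (List Int)) (row : List Int) : PySem.Set Int :=
  (PySem.Set.ofList row).foldl (fun c q => PySem.Set.update c (index.getD q [])) PySem.Set.empty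

def gen_possible_connections_alt (all_rows : List (List Int)) : List (List Int) :=
  let index := pvBuildIndex all_rows
  let n := PySem.List.len all_rows
  all_rows.foldl
    (fun result row =>
      result ++ [(PySem.List.pyRange 0 n 1).filter
        (fun j => !(PySem.Set.contains (pvConflict index row) j))]) []

-- ===== PRECONDITION & SPEC =====
def Spec_gen_possible_connections (all_rows : List (List Int)) (out : List (List Int)) : Prop := out = gen_possible_connections_alt all_rows
instance (all_rows : List (List Int)) (out : List (List Int)) : Decidable (Spec_gen_possible_connections all_rows out) := by unfold Spec_gen_possible_connections; infer_instance

-- ===== CLAIM (what is proved, stated in full; the proofs are below) =====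
def Claim_equal_gen_possible_connections : Prop := ∀ (all_rows : List (List Int)), Dom_gen_possible_connections all_rows → Spec_gen_possible_connections all_rows (gen_possible_connections all_rows)

-- ===== LEMMAS AND PROOFS =====

-- the inner index-building fold: membership in the list stored at q
lemma pv_inner_getD (l : List Int) (d : PySem.Dict Int (List Int)) (i : Int) (q j : Int) :
    j ∈ (l.foldl (fun d2 q2 => d2.insert q2 (d2.getD q2 [] ++ [i])) d).getD q [] ↔
      j ∈ d.getD q [] ∨ (q ∈ l ∧ j = i) := by
  induction l generalizing d with
  | nil => simp
  | cons a rest ih =>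
    simp only [List.foldl_cons, ih, PySem.Dict.getD_insert, List.mem_cons]
    by_cases hq : q = a <;> (simp [hq]; try tauto)

-- membership in the inverted index built from 'enumerate all_rows s' on top of d
lemma pv_index_getD (xs : List (List Int)) (s : Int) (d : PySem.Dict Int (List Int)) (q j : Int) :
    j ∈ ((PySem.List.enumerate xs s).foldl
          (fun index p => (PySem.Set.ofList p.2).foldl
            (fun d2 q2 => d2.insert q2 (d2.getD q2 [] ++ [p.1])) index) d).getD q [] ↔
      j ∈ d.getD q [] ∨ ∃ k : Nat, ∃ h : k < xs.length, j = s + k ∧ q ∈ xs[k] := by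
  induction xs generalizing s d with
  | nil => simp [PySem.List.enumerate]
  | cons row rest ih =>
    have hsplit : (∃ k : Nat, ∃ h : k < (row :: rest).length, j = s + k ∧ q ∈ (row :: rest)[k]) ↔
        ((q ∈ row ∧ j = s) ∨ ∃ k : Nat, ∃ h : k < rest.length, j = (s + 1) + k ∧ q ∈ rest[k]) := by
      constructor
      · rintro ⟨k, hk, rfl, hmem⟩
        cases k with
        | zero => exact Or.inl ⟨by simpa using hmem, by simp⟩
        | succ k' =>
          exact Or.inr ⟨k', by simpa using hk, by push_cast; ring, by simpa using hmem⟩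
      · rintro (⟨hq, rfl⟩ | ⟨k, hk, rfl, hmem⟩)
        · exact ⟨0, by simp, by simp, hq⟩
        · exact ⟨k + 1, by simpa using hk, by push_cast; ring, by simpa using hmem⟩
    rw [PySem.List.enumerate_cons, hsplit]
    simp only [List.foldl_cons, ih, pv_inner_getD, PySem.Set.mem_ofList]
    tauto

lemma pv_mem_index (xs : List (List Int)) (q j : Int) :
    j ∈ (pvBuildIndex xs).getD q [] ↔
      ∃ k : Nat, ∃ h : k < xs.length, j = (k : Int) ∧ q ∈ xs[k] := by
  unfold pvBuildIndex
  rw [pv_index_getD]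
  simp

-- membership in the conflict set
lemma pv_mem_conflict_fold (l : List Int) (c : PySem.Set Int) (g : Int → List Int) (j : Int) :
    j ∈ l.foldl (fun c q => PySem.Set.update c (g q)) c ↔ j ∈ c ∨ ∃ q ∈ l, j ∈ g q := by
  induction l generalizing c with
  | nil => simp
  | cons a rest ih => simp [ih, PySem.Set.mem_update]; tauto

lemma pv_mem_conflict (xs : List (List Int)) (row : List Int) (j : Int) :
    j ∈ pvConflict (pvBuildIndex xs) row ↔
      ∃ q ∈ row, ∃ k : Nat, ∃ h : k < xs.length, j = (k : Int) ∧ q ∈ xs[k] := by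
  unfold pvConflict
  rw [pv_mem_conflict_fold]
  simp only [PySem.Set.mem_ofList, pv_mem_index]
  constructor
  · rintro (h | h)
    · simp at h
    · exact h
  · exact Or.inr

-- the enumerate-filter-map shape of A's inner row equals a pyRange filter
lemma pv_enum_filter (xs : List (List Int)) (s : Int) (P : List Int → Bool) (Q : Int → Bool)
    (h : ∀ k : Nat, ∀ hk : k < xs.length, Q (s + k) = P xs[k]) :
    ((PySem.List.enumerate xs s).filter (fun q => P q.2)).map (·.1) =
      (PySem.List.pyRange s (s + xs.length) 1).filter Q := by
  induction xs generalizing s with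
  | nil => simp [PySem.List.enumerate, PySem.List.pyRange]
  | cons row rest ih =>
    have hQ : Q s = P row := by simpa using h 0 (by simp)
    have hrec := ih (s + 1) (fun k hk => by
      have hh := h (k + 1) (by simpa using hk)
      have harg : s + 1 + (k : Int) = s + ((k : Nat) + 1 : Nat) := by push_cast; ring
      rw [harg, hh]
      simp)
    have hb : s + ((row :: rest).length : Int) = (s + 1) + (rest.length : Int) := by
      push_cast [List.length_cons]; ring
    rw [PySem.List.enumerate_cons, hb,
      PySem.List.pyRange_one_cons (by push_cast [List.length_cons] at hb ⊢; omega)]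
    by_cases hp : P row = true
    · simp [hQ, hp, hrec]
    · rw [Bool.not_eq_true] at hp
      simp [hQ, hp, hrec]

-- A's inner row equals B's inner row, for any row1
lemma pv_row_eq (xs : List (List Int)) (row1 : List Int) :
    pvInnerA xs row1 =
      (PySem.List.pyRange 0 (PySem.List.len xs) 1).filter
        (fun j => !(PySem.Set.contains (pvConflict (pvBuildIndex xs) row1) j)) := by
  unfold pvInnerA
  rw [PySem.List.foldl_append_if]
  rw [List.nil_append]
  rw [pv_enum_filter xs 0
      (fun row2 => PySem.Set.isdisjoint (PySem.Set.ofList row1) row2)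
      (fun j => !(PySem.Set.contains (pvConflict (pvBuildIndex xs) row1) j))
      ?_]
  · simp [PySem.List.len_eq]
  · intro k hk
    have key : PySem.Set.contains (pvConflict (pvBuildIndex xs) row1) (k : Int) = true ↔
        ¬ (PySem.Set.isdisjoint (PySem.Set.ofList row1) xs[k] = true) := by
      rw [PySem.Set.contains_iff, pv_mem_conflict, PySem.Set.isdisjoint_iff]
      simp only [PySem.Set.mem_ofList]
      constructor
      · rintro ⟨q, hq, k', hk', hkk, hmem⟩ hall
        have hE : k' = k := by exact_mod_cast hkk.symm
        subst hE
        exact hall q hq hmem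
      · intro hnall
        push Not at hnall
        obtain ⟨q, hq, hmem⟩ := hnall
        exact ⟨q, hq, k, hk, rfl, hmem⟩
    have h0 : (0 : Int) + (k : Int) = (k : Int) := by ring
    rw [h0]
    cases hc : PySem.Set.contains (pvConflict (pvBuildIndex xs) row1) (k : Int) <;>
      cases hd : PySem.Set.isdisjoint (PySem.Set.ofList row1) xs[k] <;>
        simp_all

theorem gen_possible_connections_spec : Claim_equal_gen_possible_connections := by
  intro all_rows _
  unfold Spec_gen_possible_connections gen_possible_connections gen_possible_connections_alt
  rw [PySem.List.foldl_append_singleton_eq_map, PySem.List.foldl_append_singleton_eq_map]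
  simp only [List.nil_append]
  have : (PySem.List.enumerate all_rows).map (fun p => pvInnerA all_rows p.2) =
      all_rows.map (fun row => pvInnerA all_rows row) := by
    rw [show (fun p : Int × List Int => pvInnerA all_rows p.2) =
        (fun row => pvInnerA all_rows row) ∘ (·.2) from rfl, ← List.map_map,
      PySem.List.map_snd_enumerate]
  rw [this]
  exact List.map_congr_left (fun row _ => pv_row_eq all_rows row)
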